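-- pv_equiv track=rewrite | github.com/leslierere/leetcode_with_python | kickstart/roundA/session.py | helper
-- ===== SOURCE A (Python) =====
-- def helper(diffs, addNo):
--     if not addNo or isSmooth(diffs):
--         return max(diffs)
--
--     maxIndex, curMax = 0, 0
--     for index, diff in enumerate(diffs):
--         if diff>curMax:
--             maxIndex, curMax = index, diff
--     insert1 = curMax//2
--     insert2 = curMax-insert1
--     newDiffs = diffs[:maxIndex]+[insert1, insert2] + diffs[maxIndex+1:]
--     return helper(newDiffs, addNo-1)
--
-- def isSmooth(diffs):
--     return sum(diffs)==len(diffs)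
-- ===== SOURCE B (Python) =====
-- # B: keep the segments as one descending sorted list with an incrementally
-- # maintained sum/length, instead of rescanning and rebuilding the whole list
-- # each round; split the head (the true maximum) addNo times.
-- # Return value only; neither A nor B mutates its arguments.
--
-- def _ins(x, order):
--     # insert x into the descending list 'order', before the first smaller element
--     for i, v in enumerate(order):
--         if v < x:
--             return order[:i] + [x] + order[i:]
--     return order + [x]
--
-- def helper(diffs, addNo):
--     order = sorted(diffs, reverse=True)
--     total = sum(diffs)
--     n = len(diffs)
--     while addNo > 0 and total != n:
--         top = order[0]
--         half = top // 2
--         order = _ins(top - half, _ins(half, order[1:]))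
--         n += 1
--         addNo -= 1
--     return order[0]
-- ===== Notes on version B (the rewrite author's own statement) =====
-- stated objective: alternative
-- what changed: A recursively rescans the whole list for the maximum, rebuilds it by slicing and recomputes sum/len every round; B keeps a descending sorted list, splits its head, reinserts the two halves in order and maintains sum and length incrementally, returning the head at the end.
-- intended difference: When every element is <= -2**addNo (and addNo>=1), A's max-scan starts from curMax=0, so A replaces the first element by [0,0] and returns 0, silently discarding a segment; B splits the true (negative) maximum and returns the still-negative result, the intended generalization of 'split the largest segment'. — e.g. on helper([-5], 1): A returns 0, B returns -2
-- outside the precondition, e.g. on helper([3], -1): A returns 1, B returns 3; on helper([2000], 950): A returns 4, B returns 4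
import Mathlib
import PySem

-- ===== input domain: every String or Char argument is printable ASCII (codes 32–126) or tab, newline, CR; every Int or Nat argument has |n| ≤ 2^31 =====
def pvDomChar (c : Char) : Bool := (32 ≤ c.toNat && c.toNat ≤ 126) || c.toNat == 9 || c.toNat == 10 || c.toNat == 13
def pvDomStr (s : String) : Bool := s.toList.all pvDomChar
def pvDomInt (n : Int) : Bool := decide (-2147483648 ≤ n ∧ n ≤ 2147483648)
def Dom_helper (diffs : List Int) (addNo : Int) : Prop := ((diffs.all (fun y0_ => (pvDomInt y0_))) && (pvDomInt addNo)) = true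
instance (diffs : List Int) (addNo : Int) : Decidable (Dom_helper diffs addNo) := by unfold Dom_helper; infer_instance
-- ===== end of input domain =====

-- B keeps the segments in a descending sorted list with incrementally maintained
-- sum/length instead of A's rescan-and-rebuild recursion (objective: alternative).
-- Return value only; neither program mutates its arguments.

-- ===== PORT A =====
-- max(diffs); Python raises ValueError on [], excluded by Pre_helper
def pyMaxD (l : List Int) : Int := (PySem.List.max? l (fun y => y)).getD 0

-- isSmooth(diffs): sum(diffs)==len(diffs)
def isSmooth (diffs : List Int) : Bool := diffs.sum == (diffs.length : Int)

-- A's scan loop: maxIndex, curMax = 0, 0; for index, diff in enumerate(diffs): …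
def scanA : List Int → Int → Int × Int → Int × Int
  | [], _, st => st
  | d :: t, i, st => scanA t (i + 1) (if d > st.2 then (i, d) else st)

-- A's recursion, fuelled by addNo.toNat (A recurses exactly once per decrement of
-- addNo; fuel 0 with addNo ≠ 0 is unreachable under Pre_helper)
def helperA : Nat → List Int → Int → Int
  | 0, diffs, addNo =>
    if addNo == 0 || isSmooth diffs then pyMaxD diffs else 0
  | f + 1, diffs, addNo =>
    if addNo == 0 || isSmooth diffs then pyMaxD diffs
    else
      let mc := scanA diffs 0 (0, 0)
      let i1 := PySem.Int.floordiv mc.2 2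
      let i2 := mc.2 - i1
      helperA f (PySem.List.slice diffs none (some mc.1) ++ [i1, i2] ++
                 PySem.List.slice diffs (some (mc.1 + 1)) none) (addNo - 1)

def helper (diffs : List Int) (addNo : Int) : Int := helperA addNo.toNat diffs addNo

-- ===== PORT B =====
-- _ins(x, order): insert x into the descending list before the first smaller element
def insDesc (x : Int) : List Int → List Int
  | [] => [x]
  | v :: t => if v < x then x :: v :: t else v :: insDesc x t

-- B's while loop, fuelled by addNo.toNat (one iteration per decrement of addNo)
def helperBLoop : Nat → List Int → Int → Int → Int → List Int
  | 0, order, _, _, _ => order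
  | f + 1, order, total, n, addNo =>
    if addNo > 0 && total != n then
      match order with
      | top :: rest =>
        let half := PySem.Int.floordiv top 2
        helperBLoop f (insDesc (top - half) (insDesc half rest)) total (n + 1) (addNo - 1)
      | [] => order
    else order

def helper_alt (diffs : List Int) (addNo : Int) : Int :=
  (helperBLoop addNo.toNat (PySem.List.sorted diffs (fun y => y) true)
    diffs.sum (diffs.length : Int) addNo).headD 0

-- ===== PRECONDITION & SPEC =====
-- preSteps is the closed-form count of recursive calls A makes (from sum, length,
-- sign of the maximum and the first element only): A's sum is invariant and its
-- length grows by 1 per split while the maximum stays positive, so it stops after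
-- sum-len steps (or addNo, whichever is first); if no element is positive, the
-- first step replaces diffs[0] by [0,0], after which sum-diffs[0] is invariant.
def preSteps (diffs : List Int) (addNo : Int) : Int :=
  if diffs.sum = (diffs.length : Int) then 0
  else if diffs.any (fun x => decide (0 < x)) then
    (if (diffs.length : Int) < diffs.sum then min addNo (diffs.sum - (diffs.length : Int))
     else addNo)
  else if 1 ≤ diffs.sum - diffs.headD 0 - (diffs.length : Int) then
    min addNo (diffs.sum - diffs.headD 0 - (diffs.length : Int))
  else addNo

-- Pre_ excludes: [] (A raises ValueError in max); negative addNo, outside the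
-- natural domain of a split count (A then recurses until the list is smooth, or
-- raises RecursionError if it never is — see cites); and inputs on which A's
-- recursion runs deeper than 900 frames (preSteps > 900), where CPython raises
-- RecursionError once the 1000-frame limit minus the caller's stack is exceeded
-- (a safety margin: a few such inputs still return at a shallow call site, see cites).
def Pre_helper (diffs : List Int) (addNo : Int) : Prop :=
  diffs ≠ [] ∧ 0 ≤ addNo ∧ preSteps diffs addNo ≤ 900
instance (diffs : List Int) (addNo : Int) : Decidable (Pre_helper diffs addNo) := by
  unfold Pre_helper; infer_instance
def pvWitness_helper : List Int × Int := ([3], 1)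

-- When every element is ≤ -2^addNo (addNo ≥ 1), A's scan starts from curMax = 0, so A
-- replaces the first element by [0, 0] and returns 0, silently discarding a segment;
-- B splits the true (negative) maximum and returns the still-negative result, the
-- intended generalization of "split the largest segment".
def D_helper (diffs : List Int) (addNo : Int) : Prop :=
  diffs ≠ [] ∧ 1 ≤ addNo ∧ ∀ x ∈ diffs, x ≤ -(2 ^ addNo.toNat : Int)
instance (diffs : List Int) (addNo : Int) : Decidable (D_helper diffs addNo) := by
  unfold D_helper; infer_instance

def Spec_helper (diffs : List Int) (addNo : Int) (out : Int) : Prop :=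
  ¬ D_helper diffs addNo → out = helper_alt diffs addNo
instance (diffs : List Int) (addNo : Int) (out : Int) : Decidable (Spec_helper diffs addNo out) := by
  unfold Spec_helper; infer_instance

def pvDiffWitness_helper : List Int × Int := ([-5], 1)
def pvDiffWitnessOut_helper : Int × Int := (0, -2)

-- ===== CLAIM (what is proved, stated in full; the proofs are below) =====
def Claim_unchanged_helper : Prop := ∀ (diffs : List Int) (addNo : Int), Dom_helper diffs addNo → Pre_helper diffs addNo → Spec_helper diffs addNo (helper diffs addNo)
def Claim_changed_helper : Prop := Dom_helper (pvDiffWitness_helper.1) (pvDiffWitness_helper.2) ∧ Pre_helper (pvDiffWitness_helper.1) (pvDiffWitness_helper.2) ∧ D_helper (pvDiffWitness_helper.1) (pvDiffWitness_helper.2) ∧ helper (pvDiffWitness_helper.1) (pvDiffWitness_helper.2) = pvDiffWitnessOut_helper.1 ∧ helper_alt (pvDiffWitness_helper.1) (pvDiffWitness_helper.2) = pvDiffWitnessOut_helper.2 ∧ pvDiffWitnessOut_helper.1 ≠ pvDiffWitnessOut_helper.2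
def Claim_exact_helper : Prop := ∀ (diffs : List Int) (addNo : Int), Dom_helper diffs addNo → Pre_helper diffs addNo → D_helper diffs addNo → helper diffs addNo ≠ helper_alt diffs addNo

-- ===== LEMMAS AND PROOFS =====

-- descending order invariant
def SortedDesc (l : List Int) : Prop := l.Pairwise (fun a b => b ≤ a)

theorem insDesc_perm (x : Int) (l : List Int) : (insDesc x l).Perm (x :: l) := by
  induction l with
  | nil => simp [insDesc]
  | cons v t ih =>
    simp only [insDesc]
    split
    · exact List.Perm.refl _
    · exact (ih.cons v).trans (List.Perm.swap x v t)

theorem insDesc_sorted (x : Int) (l : List Int) (h : SortedDesc l) :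
    SortedDesc (insDesc x l) := by
  induction l with
  | nil => simp [insDesc, SortedDesc]
  | cons v t ih =>
    simp only [insDesc]
    rcases (List.pairwise_cons.mp h) with ⟨hv, ht⟩
    split
    · rename_i hlt
      refine List.pairwise_cons.mpr ⟨?_, h⟩
      intro y hy
      rcases List.mem_cons.mp hy with rfl | hyt
      · omega
      · exact le_trans (hv y hyt) (by omega)
    · rename_i hnlt
      refine List.pairwise_cons.mpr ⟨?_, ih ht⟩
      intro y hy
      rcases List.mem_cons.mp ((insDesc_perm x t).mem_iff.mp hy) with rfl | hyt
      · omega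
      · exact hv y hyt

theorem insDesc_headD (x d : Int) (l : List Int) (h : ∀ y ∈ l, y ≤ x) :
    (insDesc x l).headD d = x := by
  cases l with
  | nil => simp [insDesc]
  | cons v t =>
    simp only [insDesc]
    have hv : v ≤ x := h v (by simp)
    split
    · simp
    · simp; omega

theorem headD_max (l ord : List Int) (d : Int) (hne : l ≠ [])
    (hperm : ord.Perm l) (hs : SortedDesc ord) :
    pyMaxD l = ord.headD d ∧ (∀ x ∈ l, x ≤ ord.headD d) ∧ ord.headD d ∈ l := by
  cases ord with
  | nil => exact absurd hperm.nil_eq.symm hne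
  | cons h t =>
    have hth : ∀ y ∈ t, y ≤ h := (List.pairwise_cons.mp hs).1
    have hmem : h ∈ l := hperm.mem_iff.mp (List.mem_cons_self)
    have hle : ∀ x ∈ l, x ≤ h := by
      intro x hx
      rcases List.mem_cons.mp (hperm.mem_iff.mpr hx) with rfl | hxt
      · exact le_refl x
      · exact hth x hxt
    obtain ⟨m, hm⟩ : ∃ m, PySem.List.max? l (fun y => y) = some m := by
      cases hmx : PySem.List.max? l (fun y => y) with
      | none => exact absurd ((PySem.List.max?_eq_none_iff l (fun y => y)).mp hmx) hne
      | some m => exact ⟨m, rfl⟩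
    have hmm : m ∈ l := PySem.List.max?_mem hm
    have hmax : ∀ y ∈ l, y ≤ m := PySem.List.max?_isMax hm
    have heq : m = h := le_antisymm (hle m hmm) (hmax h hmem)
    refine ⟨?_, by simpa using hle, by simpa using hmem⟩
    simp [pyMaxD, hm, heq]

theorem scan_stable (t : List Int) (i : Int) (st : Int × Int)
    (h : ∀ x ∈ t, x ≤ st.2) : scanA t i st = st := by
  induction t generalizing i with
  | nil => rfl
  | cons d r ih =>
    have hd : d ≤ st.2 := h d (by simp)
    simp only [scanA, if_neg (by omega : ¬ d > st.2)]
    exact ih _ fun x hx => h x (by simp [hx])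

theorem scan_nonpos (l : List Int) (i : Int) (h : ∀ x ∈ l, x ≤ 0) :
    scanA l i (0, 0) = (0, 0) :=
  scan_stable l i (0, 0) h

theorem scan_spec (m : Int) : ∀ (l : List Int) (i : Int) (st : Int × Int),
    (∀ x ∈ l, x ≤ m) → m ∈ l → st.2 < m →
    ∃ l1 l2, l = l1 ++ m :: l2 ∧ scanA l i st = (i + l1.length, m) := by
  intro l
  induction l with
  | nil => intro i st _ hm _; simp at hm
  | cons d t ih =>
    intro i st hall hm hst
    by_cases hdm : d = m
    · subst hdm
      refine ⟨[], t, by simp, ?_⟩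
      simp only [scanA, if_pos (by omega : d > st.2)]
      rw [scan_stable t (i + 1) (i, d) (fun x hx => hall x (by simp [hx]))]
      simp
    · have hd : d < m := lt_of_le_of_ne (hall d (by simp)) hdm
      have hmt : m ∈ t := (List.mem_cons.mp hm).resolve_left (fun h => hdm h.symm)
      have hst' : (if d > st.2 then ((i, d) : Int × Int) else st).2 < m := by
        split <;> simpa using by omega
      obtain ⟨l1, l2, hdec, hsc⟩ := ih (i + 1) _ (fun x hx => hall x (by simp [hx])) hmt hst'
      refine ⟨d :: l1, l2, by simp [hdec], ?_⟩
      simp only [scanA]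
      rw [hsc]
      have : i + 1 + (l1.length : Int) = i + ((d :: l1).length : Int) := by push_cast [List.length_cons]; omega
      rw [this]

theorem insDesc_ne_nil (x : Int) (l : List Int) : insDesc x l ≠ [] := by
  cases l with
  | nil => simp [insDesc]
  | cons v t => simp only [insDesc]; split <;> simp

theorem pyMaxD_zero (l : List Int) (h0 : ∀ x ∈ l, x ≤ 0) (hz : (0 : Int) ∈ l) :
    pyMaxD l = 0 := by
  obtain ⟨m, hm⟩ : ∃ m, PySem.List.max? l (fun y => y) = some m := by
    cases hmx : PySem.List.max? l (fun y => y) with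
    | none =>
      exact absurd ((PySem.List.max?_eq_none_iff l (fun y => y)).mp hmx)
        (List.ne_nil_of_mem hz)
    | some m => exact ⟨m, rfl⟩
  have h1 : m ≤ 0 := h0 m (PySem.List.max?_mem hm)
  have h2 : (0 : Int) ≤ m := PySem.List.max?_isMax hm 0 hz
  simp [pyMaxD, hm]
  omega

theorem sum_nonpos_of_nonpos (l : List Int) (h : ∀ x ∈ l, x ≤ 0) : l.sum ≤ 0 := by
  induction l with
  | nil => simp
  | cons d t ih =>
    have := h d (by simp)
    have := ih (fun x hx => h x (by simp [hx]))
    simp only [List.sum_cons]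
    omega

-- A returns 0 once 0 is in the list and everything is ≤ 0
theorem helperA_zero_mem : ∀ (f : Nat) (l : List Int) (a : Int),
    (∀ x ∈ l, x ≤ 0) → (0 : Int) ∈ l → helperA f l a = 0 := by
  intro f
  induction f with
  | zero =>
    intro l a h0 hz
    rw [helperA]
    split
    · exact pyMaxD_zero l h0 hz
    · rfl
  | succ f ih =>
    intro l a h0 hz
    rw [helperA]
    split
    · exact pyMaxD_zero l h0 hz
    · have e1 : PySem.List.slice l none (some (0 : Int)) = [] := by
        simp [PySem.List.slice_to]
      have e2 : PySem.List.slice l (some ((0 : Int) + 1)) none = l.tail := by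
        norm_num [PySem.List.slice_from_one]
      simp only [scan_nonpos l 0 h0, show PySem.Int.floordiv 0 2 = 0 from by decide,
        e1, e2, List.nil_append, sub_zero]
      refine ih _ (a - 1) ?_ (by simp)
      intro x hx
      rcases List.mem_append.mp hx with h | h
      · rcases List.mem_cons.mp h with rfl | h
        · exact le_refl 0
        · rcases List.mem_cons.mp h with rfl | h
          · exact le_refl 0
          · simp at h
      · exact h0 x (List.tail_sublist l |>.subset h)

-- A returns 0 on a nonempty all-nonpositive list when it performs at least one step
theorem helperA_nonpos (f : Nat) (l : List Int) (a : Int)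
    (h0 : ∀ x ∈ l, x ≤ 0) (hne : l ≠ []) (ha : 1 ≤ a) (hf : a.toNat = f) :
    helperA f l a = 0 := by
  cases f with
  | zero => omega
  | succ f =>
    have hsum : l.sum ≤ 0 := sum_nonpos_of_nonpos l h0
    have hlen : 0 < l.length := List.length_pos_iff.mpr hne
    rw [helperA]
    have hg : (a == 0 || isSmooth l) = false := by
      have h1 : (a == 0) = false := by simp; omega
      have h2 : isSmooth l = false := by simp [isSmooth]; omega
      rw [h1, h2]; rfl
    rw [hg]
    simp only [Bool.false_eq_true, if_false]
    have e1 : PySem.List.slice l none (some (0 : Int)) = [] := by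
      simp [PySem.List.slice_to]
    have e2 : PySem.List.slice l (some ((0 : Int) + 1)) none = l.tail := by
      norm_num [PySem.List.slice_from_one]
    simp only [scan_nonpos l 0 h0, show PySem.Int.floordiv 0 2 = 0 from by decide,
      e1, e2, List.nil_append, sub_zero]
    refine helperA_zero_mem f _ (a - 1) ?_ (by simp)
    intro x hx
    rcases List.mem_append.mp hx with h | h
    · rcases List.mem_cons.mp h with rfl | h
      · exact le_refl 0
      · rcases List.mem_cons.mp h with rfl | h
        · exact le_refl 0
        · simp at h
    · exact h0 x (List.tail_sublist l |>.subset h)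

-- B's head trajectory on an all-nonpositive sorted list
def negIter : Nat → Int → Int
  | 0, v => v
  | k + 1, v => negIter k (v - PySem.Int.floordiv v 2)

theorem helperB_nonpos : ∀ (f : Nat) (ord : List Int) (total n a : Int),
    ord ≠ [] → SortedDesc ord → (∀ x ∈ ord, x ≤ 0) → total ≤ 0 → 1 ≤ n →
    0 ≤ a → a.toNat = f →
    (helperBLoop f ord total n a).headD 0 = negIter f (ord.headD 0) := by
  intro f
  induction f with
  | zero => intro ord total n a _ _ _ _ _ _ _; simp [helperBLoop, negIter]
  | succ f ih =>
    intro ord total n a hne hs h0 ht hn ha hf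
    cases ord with
    | nil => exact absurd rfl hne
    | cons top rest =>
      rw [helperBLoop]
      have hg : (decide (a > 0) && (total != n)) = true := by
        simp only [Bool.and_eq_true, decide_eq_true_eq, bne_iff_ne, ne_eq]
        omega
      rw [hg]
      simp only [if_true]
      have htop0 : top ≤ 0 := h0 top (by simp)
      have hdiv : PySem.Int.floordiv top 2 = top / 2 :=
        PySem.Int.floordiv_eq_ediv_of_pos (by norm_num)
      have hrest_le : ∀ y ∈ rest, y ≤ top := (List.pairwise_cons.mp hs).1
      have hins_le : ∀ y ∈ insDesc (PySem.Int.floordiv top 2) rest,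
          y ≤ top - PySem.Int.floordiv top 2 := by
        intro y hy
        rcases List.mem_cons.mp
          ((insDesc_perm (PySem.Int.floordiv top 2) rest).mem_iff.mp hy) with rfl | hyr
        · rw [hdiv]; omega
        · have := hrest_le y hyr; rw [hdiv]; omega
      have hhead := insDesc_headD (top - PySem.Int.floordiv top 2) 0 _ hins_le
      have h0' : ∀ x ∈ insDesc (top - PySem.Int.floordiv top 2)
          (insDesc (PySem.Int.floordiv top 2) rest), x ≤ 0 := by
        intro x hx
        rcases List.mem_cons.mp ((insDesc_perm _ _).mem_iff.mp hx) with rfl | hx2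
        · rw [hdiv]; omega
        · rcases List.mem_cons.mp ((insDesc_perm _ _).mem_iff.mp hx2) with rfl | hx3
          · rw [hdiv]; omega
          · exact h0 x (by simp [hx3])
      rw [ih _ total (n + 1) (a - 1) (insDesc_ne_nil _ _)
        (insDesc_sorted _ _ (insDesc_sorted _ _ (List.pairwise_cons.mp hs).2))
        h0' ht (by omega) (by omega) (by omega)]
      rw [hhead]
      simp only [List.headD_cons]
      rfl

theorem negIter_val (k : Nat) (v : Int) (hv : v ≤ 0) :
    negIter k v = -((((-v).toNat / 2 ^ k : Nat)) : Int) := by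
  induction k generalizing v with
  | zero => simp [negIter]; omega
  | succ k ih =>
    have h2 : PySem.Int.floordiv v 2 = v / 2 := PySem.Int.floordiv_eq_ediv_of_pos (by norm_num)
    have hw : v - PySem.Int.floordiv v 2 ≤ 0 := by rw [h2]; omega
    have : negIter (k + 1) v = negIter k (v - PySem.Int.floordiv v 2) := rfl
    rw [this, ih _ hw, h2]
    have hq : (-(v - v / 2)).toNat = (-v).toNat / 2 := by omega
    rw [hq, Nat.div_div_eq_div_mul, Nat.mul_comm 2 (2 ^ k), ← pow_succ]

-- main equivalence when some element is positive
theorem main_pos : ∀ (f : Nat) (l ord : List Int) (total n a : Int),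
    a.toNat = f → 0 ≤ a → l ≠ [] → ord.Perm l → SortedDesc ord →
    (∃ x ∈ l, 0 < x) → total = l.sum → n = (l.length : Int) →
    helperA f l a = (helperBLoop f ord total n a).headD 0 := by
  intro f
  induction f with
  | zero =>
    intro l ord total n a hf ha hne hperm hs _ _ _
    have ha0 : a = 0 := by omega
    subst ha0
    rw [helperA]
    have hB : helperBLoop 0 ord total n 0 = ord := by simp [helperBLoop]
    rw [hB]
    have hgA : ((0 : Int) == 0 || isSmooth l) = true := by simp
    rw [hgA]
    simp only [if_true]
    exact (headD_max l ord 0 hne hperm hs).1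
  | succ f ih =>
    intro l ord total n a hf ha hne hperm hs hpos htot hn
    have ha1 : 1 ≤ a := by omega
    by_cases hsm : isSmooth l = true
    · have hgA : (a == 0 || isSmooth l) = true := by rw [hsm]; simp
      have hgB : (decide (a > 0) && (total != n)) = false := by
        have : total = n := by
          simp only [isSmooth, beq_iff_eq] at hsm
          omega
        simp [this]
      have hB : helperBLoop (f + 1) ord total n a = ord := by
        cases ord <;> simp [helperBLoop, hgB]
      rw [helperA, hgA, hB]
      simp only [if_true]
      exact (headD_max l ord 0 hne hperm hs).1
    · obtain ⟨x, hxl, hx0⟩ := hpos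
      cases ord with
      | nil => exact absurd hperm.nil_eq.symm hne
      | cons top rest =>
        obtain ⟨hmaxeq, hle, hmem⟩ := headD_max l (top :: rest) 0 hne hperm hs
        simp only [List.headD_cons] at hmaxeq hle hmem
        have htop_pos : 0 < top := lt_of_lt_of_le hx0 (hle x hxl)
        obtain ⟨l1, l2, hdec, hsc⟩ :=
          scan_spec top l 0 (0, 0) hle hmem (by simpa using htop_pos)
        rw [helperA, helperBLoop]
        have hgA : (a == 0 || isSmooth l) = false := by
          have h1 : (a == 0) = false := by simp; omega
          have h2 : isSmooth l = false := by simpa using hsm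
          rw [h1, h2]; rfl
        have hgB : (decide (a > 0) && (total != n)) = true := by
          have hne' : total ≠ n := by
            simp only [isSmooth, beq_iff_eq] at hsm
            omega
          simp only [Bool.and_eq_true, decide_eq_true_eq, bne_iff_ne, ne_eq]
          exact ⟨by omega, hne'⟩
        rw [hgA, hgB]
        simp only [Bool.false_eq_true, if_false, if_true]
        simp only [hsc, zero_add]
        have hdiv : PySem.Int.floordiv top 2 = top / 2 :=
          PySem.Int.floordiv_eq_ediv_of_pos (by norm_num)
        have e1 : PySem.List.slice l none (some ((l1.length : Nat) : Int)) = l1 := by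
          rw [PySem.List.slice_to_natCast, hdec, List.take_left]
        have e2 : PySem.List.slice l (some (((l1.length : Nat) : Int) + 1)) none = l2 := by
          have : ((l1.length : Nat) : Int) + 1 = (((l1.length + 1 : Nat)) : Int) := by
            push_cast; ring
          rw [this, PySem.List.slice_from_natCast, hdec]
          have : l1 ++ top :: l2 = (l1 ++ [top]) ++ l2 := by simp
          rw [this, List.drop_left' (by simp)]
        simp only [e1, e2]
        -- abbreviations
        have hrest_perm : rest.Perm (l1 ++ l2) := by
          have h1 : (top :: rest).Perm (top :: (l1 ++ l2)) :=
            hperm.trans (by rw [hdec]; exact List.perm_middle)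
          exact h1.cons_inv
        have hrest_sorted : SortedDesc rest := (List.pairwise_cons.mp hs).2
        set i1 := PySem.Int.floordiv top 2 with hi1
        have hperm' : (insDesc (top - i1) (insDesc i1 rest)).Perm
            (l1 ++ [i1, top - i1] ++ l2) := by
          have p1 : (insDesc (top - i1) (insDesc i1 rest)).Perm
              ((top - i1) :: i1 :: (l1 ++ l2)) :=
            (insDesc_perm _ _).trans
              (((insDesc_perm i1 rest).trans (hrest_perm.cons i1)).cons (top - i1))
          have p2 : (l1 ++ [i1, top - i1] ++ l2).Perm (i1 :: (top - i1) :: (l1 ++ l2)) := by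
            have he : l1 ++ [i1, top - i1] ++ l2 = l1 ++ i1 :: ((top - i1) :: l2) := by simp
            rw [he]
            exact List.perm_middle.trans (List.Perm.cons _ List.perm_middle)
          exact p1.trans ((List.Perm.swap i1 (top - i1) (l1 ++ l2)).trans p2.symm)
        have hs' : SortedDesc (insDesc (top - i1) (insDesc i1 rest)) :=
          insDesc_sorted _ _ (insDesc_sorted _ _ hrest_sorted)
        refine (ih (l1 ++ [i1, top - i1] ++ l2) _ total (n + 1) (a - 1)
          (by omega) (by omega) (by simp) hperm' hs' ?_ ?_ ?_).symm.symm
        · exact ⟨top - i1, by simp, by rw [hdiv]; omega⟩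
        · rw [htot, hdec]
          simp only [List.sum_append, List.sum_cons, List.sum_nil]
          omega
        · rw [hn, hdec]
          simp only [List.length_append, List.length_cons, List.length_nil]
          push_cast
          omega

-- B on an all-nonpositive input: closed form for the returned value
theorem helperB_nonpos_val (diffs : List Int) (addNo : Int)
    (hne : diffs ≠ []) (h0 : ∀ x ∈ diffs, x ≤ 0) (ha0 : 0 ≤ addNo) :
    helper_alt diffs addNo =
      -(((-(PySem.List.sorted diffs (fun y => y) true).headD 0).toNat /
          2 ^ addNo.toNat : Nat) : Int) := by
  have hperm : (PySem.List.sorted diffs (fun y => y) true).Perm diffs :=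
    PySem.List.sorted_perm diffs (fun y => y) true
  have hs : SortedDesc (PySem.List.sorted diffs (fun y => y) true) := by
    have h := PySem.List.sorted_pairwise_rev (xs := diffs) (key := fun y => y)
    simpa [SortedDesc] using h
  have hone : (PySem.List.sorted diffs (fun y => y) true) ≠ [] := by
    intro h
    exact hne ((h ▸ hperm).nil_eq.symm)
  have h0' : ∀ x ∈ PySem.List.sorted diffs (fun y => y) true, x ≤ 0 :=
    fun x hx => h0 x (hperm.mem_iff.mp hx)
  obtain ⟨_, hle, hmem⟩ :=
    headD_max diffs (PySem.List.sorted diffs (fun y => y) true) 0 hne hperm hs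
  have hm0 : (PySem.List.sorted diffs (fun y => y) true).headD 0 ≤ 0 := h0 _ hmem
  unfold helper_alt
  rw [helperB_nonpos addNo.toNat _ diffs.sum (diffs.length : Int) addNo hone hs h0'
    (sum_nonpos_of_nonpos diffs h0)
    (by have := List.length_pos_iff.mpr hne; omega) ha0 rfl]
  exact negIter_val addNo.toNat _ hm0

-- ===== VERDICT (by name: the statement is the Claim_ definition above) =====
theorem helper_spec : Claim_unchanged_helper := by
  intro diffs addNo _ hPre
  obtain ⟨hne, ha0, _⟩ := hPre
  unfold Spec_helper
  intro hnD
  have hperm : (PySem.List.sorted diffs (fun y => y) true).Perm diffs :=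
    PySem.List.sorted_perm diffs (fun y => y) true
  have hs : SortedDesc (PySem.List.sorted diffs (fun y => y) true) := by
    have h := PySem.List.sorted_pairwise_rev (xs := diffs) (key := fun y => y)
    simpa [SortedDesc] using h
  by_cases hpos : ∃ x ∈ diffs, 0 < x
  · exact main_pos addNo.toNat diffs _ diffs.sum (diffs.length : Int) addNo
      rfl ha0 hne hperm hs hpos rfl rfl
  · push Not at hpos
    by_cases haz : addNo = 0
    · subst haz
      show helperA 0 diffs 0 = _
      have hB : helper_alt diffs 0 =
          (PySem.List.sorted diffs (fun y => y) true).headD 0 := by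
        unfold helper_alt
        rw [show helperBLoop (0 : Int).toNat (PySem.List.sorted diffs (fun y => y) true)
          diffs.sum (diffs.length : Int) 0 =
          PySem.List.sorted diffs (fun y => y) true from rfl]
      rw [hB, helperA]
      have hgA : ((0 : Int) == 0 || isSmooth diffs) = true := by simp
      rw [hgA]
      simp only [if_true]
      exact (headD_max diffs _ 0 hne hperm hs).1
    · have ha1 : 1 ≤ addNo := by omega
      have hA : helper diffs addNo = 0 :=
        helperA_nonpos addNo.toNat diffs addNo hpos hne ha1 rfl
      obtain ⟨_, hle, hmem⟩ :=
        headD_max diffs (PySem.List.sorted diffs (fun y => y) true) 0 hne hperm hs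
      obtain ⟨x, hx, hxgt⟩ : ∃ x ∈ diffs, -(2 ^ addNo.toNat : Int) < x := by
        by_contra hc
        push Not at hc
        exact hnD ⟨hne, ha1, hc⟩
      have hmgt : -(2 ^ addNo.toNat : Int) <
          (PySem.List.sorted diffs (fun y => y) true).headD 0 :=
        lt_of_lt_of_le hxgt (hle x hx)
      have hlt : (-(PySem.List.sorted diffs (fun y => y) true).headD 0).toNat <
          2 ^ addNo.toNat := by
        have h1 : -((PySem.List.sorted diffs (fun y => y) true).headD 0) <
            ((2 ^ addNo.toNat : Nat) : Int) := by push_cast; omega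
        have h2 : 1 ≤ 2 ^ addNo.toNat := Nat.one_le_two_pow
        omega
      rw [hA, helperB_nonpos_val diffs addNo hne hpos ha0, Nat.div_eq_of_lt hlt]
      simp

theorem helper_changed : Claim_changed_helper := by
  unfold Claim_changed_helper; decide

theorem helper_tight : Claim_exact_helper := by
  intro diffs addNo _ hPre hD
  obtain ⟨hne, ha0, _⟩ := hPre
  obtain ⟨_, ha1, hall⟩ := hD
  have hpow : (0 : Int) < 2 ^ addNo.toNat := by positivity
  have h0 : ∀ x ∈ diffs, x ≤ 0 := fun x hx => by have := hall x hx; omega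
  have hA : helper diffs addNo = 0 :=
    helperA_nonpos addNo.toNat diffs addNo h0 hne ha1 rfl
  have hperm : (PySem.List.sorted diffs (fun y => y) true).Perm diffs :=
    PySem.List.sorted_perm diffs (fun y => y) true
  have hs : SortedDesc (PySem.List.sorted diffs (fun y => y) true) := by
    have h := PySem.List.sorted_pairwise_rev (xs := diffs) (key := fun y => y)
    simpa [SortedDesc] using h
  obtain ⟨_, hle, hmem⟩ :=
    headD_max diffs (PySem.List.sorted diffs (fun y => y) true) 0 hne hperm hs
  have hmle : (PySem.List.sorted diffs (fun y => y) true).headD 0 ≤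
      -(2 ^ addNo.toNat : Int) := hall _ hmem
  have hge : 2 ^ addNo.toNat ≤
      (-(PySem.List.sorted diffs (fun y => y) true).headD 0).toNat := by
    have h1 : ((2 ^ addNo.toNat : Nat) : Int) ≤
        -((PySem.List.sorted diffs (fun y => y) true).headD 0) := by push_cast; omega
    omega
  have hdiv : 1 ≤ (-(PySem.List.sorted diffs (fun y => y) true).headD 0).toNat /
      2 ^ addNo.toNat := (Nat.one_le_div_iff (by positivity)).mpr hge
  rw [hA, helperB_nonpos_val diffs addNo hne h0 ha0]
  intro hcontra
  omega
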